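-- pv_equiv track=rewrite | github.com/MOFplus/cmc-tools | src/molsys/util/systre.py | skey_string_to_list
-- ===== SOURCE A (Python) =====
-- def skey_string_to_list(skey):
--     """ Converts a systre string key, something like
--     '3 1 2 0 0 0 1 2 1 0 0 1 3 0 0 0 1 3 0 1 0 2 4 0 0 0 2 4 1 0 0 3 4 0 0 1 3 4 0 1 1'
--     to a list. Crops of the dimensionality
--     """
--     slist = []
--     skey=skey.split(' ')[1:]
--     for i,s in enumerate(skey):
--         if i % 5 == 0:
--             slist.append([])
--         if i % 5 == 0:
--             slist[-1].append([int(s)])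
--         elif i % 5 == 1:
--             slist[-1][0].append(int(s))
--         elif i % 5 == 2:
--             slist[-1].append([int(s)])
--         else:
--             slist[-1][-1].append(int(s))
--     return slist
-- ===== SOURCE B (Python) =====
-- def skey_string_to_list(skey):
--     tokens = skey.split(' ')[1:]
--     out = []
--     for g in range(0, len(tokens), 5):
--         chunk = tokens[g:g+5]
--         first = [int(x) for x in chunk[:2]]
--         if len(chunk) > 2:
--             out.append([first, [int(x) for x in chunk[2:5]]])
--         else:
--             out.append([first])
--     return out
-- ===== Notes on version B (the rewrite author's own statement) =====
-- stated objective: simpler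
-- what changed: B drops A's per-token i%5 state machine that appends into / indexes into the last nested list, and instead slices the token list into chunks of five up front, building each [[first two],[last three]] pair directly from slice comprehensions.
import Mathlib
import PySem

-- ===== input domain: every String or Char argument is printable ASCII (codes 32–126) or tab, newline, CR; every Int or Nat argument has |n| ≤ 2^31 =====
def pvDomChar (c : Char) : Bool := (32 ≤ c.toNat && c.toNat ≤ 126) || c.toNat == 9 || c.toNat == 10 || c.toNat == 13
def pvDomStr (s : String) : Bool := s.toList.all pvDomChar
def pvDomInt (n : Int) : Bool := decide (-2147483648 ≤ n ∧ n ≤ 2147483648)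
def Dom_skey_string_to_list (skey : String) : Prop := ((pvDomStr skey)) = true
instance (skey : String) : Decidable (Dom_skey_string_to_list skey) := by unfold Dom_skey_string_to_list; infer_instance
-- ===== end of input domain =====

-- B replaces A's per-token i%5 state machine (append/index into the last nested list) by
-- grouping the tokens into chunks of five up front and building each pair from slices (objective: simpler).

-- int(s); Pre_ guarantees the parse succeeds (Python raises ValueError where ofStr? is none)
def pvInt (s : String) : Int := (PySem.Int.ofStr? s).getD 0

-- ===== PORT A =====
-- for i,s in enumerate(...)
def pvEnumFrom (n : Int) : List String → List (Int × String)
  | [] => []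
  | s :: r => (n, s) :: pvEnumFrom (n + 1) r

-- in-place update of slist[-1]; Python raises IndexError on [], unreachable here (i = 0 appends first)
def pvModLast {α : Type} (f : α → α) : List α → List α
  | [] => []
  | [x] => [f x]
  | x :: r => x :: pvModLast f r

-- in-place update of slist[-1][0]
def pvModHead {α : Type} (f : α → α) : List α → List α
  | [] => []
  | x :: r => f x :: r

-- one iteration of A's loop body (the i%5==0 branch first appends [] and then puts [int(s)] into it)
def pvStepA (slist : List (List (List Int))) (p : Int × String) : List (List (List Int)) :=
  if PySem.Int.mod p.1 5 = 0 then
    pvModLast (fun g => g ++ [[pvInt p.2]]) (slist ++ [[]])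
  else if PySem.Int.mod p.1 5 = 1 then
    pvModLast (pvModHead (fun l => l ++ [pvInt p.2])) slist
  else if PySem.Int.mod p.1 5 = 2 then
    pvModLast (fun g => g ++ [[pvInt p.2]]) slist
  else
    pvModLast (pvModLast (fun l => l ++ [pvInt p.2])) slist

def skey_string_to_list (skey : String) : List (List (List Int)) :=
  (((PySem.Str.split? skey " ").getD []).drop 1 |> pvEnumFrom 0 |>.foldl pvStepA [])

-- ===== PORT B =====
-- the chunk loop: chunk = tokens[g:g+5] for g = 0,5,10,…
def pvChunksB (l : List String) : List (List (List Int)) :=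
  match l with
  | [] => []
  | t :: ts =>
    let c := (t :: ts).take 5
    let first := (c.take 2).map pvInt
    (if 2 < c.length then [first, (c.drop 2).map pvInt] else [first]) :: pvChunksB ((t :: ts).drop 5)
termination_by l.length
decreasing_by simp

def skey_string_to_list_alt (skey : String) : List (List (List Int)) :=
  pvChunksB (((PySem.Str.split? skey " ").getD []).drop 1)

-- ===== PRECONDITION & SPEC =====
-- Pre_ excludes exactly the inputs on which Python's int() raises ValueError on some token
def Pre_skey_string_to_list (skey : String) : Prop :=
  ((((PySem.Str.split? skey " ").getD []).drop 1).all (fun s => (PySem.Int.ofStr? s).isSome)) = true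
instance (skey : String) : Decidable (Pre_skey_string_to_list skey) := by
  unfold Pre_skey_string_to_list; infer_instance

def pvWitness_skey_string_to_list : String := "3 1 2 0 0 0 1 2 1 0 0 1 3"

def Spec_skey_string_to_list (skey : String) (out : List (List (List Int))) : Prop :=
  out = skey_string_to_list_alt skey
instance (skey : String) (out : List (List (List Int))) : Decidable (Spec_skey_string_to_list skey out) := by
  unfold Spec_skey_string_to_list; infer_instance

-- ===== CLAIM (what is proved, stated in full; the proofs are below) =====
def Claim_equal_skey_string_to_list : Prop :=
  ∀ (skey : String), Dom_skey_string_to_list skey → Pre_skey_string_to_list skey →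
    Spec_skey_string_to_list skey (skey_string_to_list skey)

-- ===== LEMMAS AND PROOFS =====

lemma pvModLast_append_singleton {α : Type} (f : α → α) (l : List α) (x : α) :
    pvModLast f (l ++ [x]) = l ++ [f x] := by
  induction l with
  | nil => simp [pvModLast]
  | cons a r ih =>
    cases r with
    | nil => simp [pvModLast]
    | cons b r' =>
      rw [show (a :: b :: r') ++ [x] = a :: ((b :: r') ++ [x]) from rfl]
      rw [show pvModLast f (a :: ((b :: r') ++ [x])) = a :: pvModLast f ((b :: r') ++ [x]) from by
        cases r' <;> simp [pvModLast]]
      rw [ih]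
      simp

lemma pvMod5 (k : Nat) (j : Int) (h : 0 ≤ j) (h5 : j < 5) :
    PySem.Int.mod (5 * (k : Int) + j) 5 = j := by
  rw [PySem.Int.mod_eq_emod_of_pos (by norm_num : (0:Int) < 5)]
  omega

lemma pvStep0 (acc : List (List (List Int))) (i : Int) (s : String)
    (h : PySem.Int.mod i 5 = 0) : pvStepA acc (i, s) = acc ++ [[[pvInt s]]] := by
  unfold pvStepA
  rw [if_pos h, pvModLast_append_singleton]
  simp

lemma pvStep1 (acc : List (List (List Int))) (i : Int) (s : String) (g : List (List Int))
    (h : PySem.Int.mod i 5 = 1) :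
    pvStepA (acc ++ [g]) (i, s) = acc ++ [pvModHead (fun l => l ++ [pvInt s]) g] := by
  unfold pvStepA
  rw [if_neg (by rw [h]; decide), if_pos h, pvModLast_append_singleton]

lemma pvStep2 (acc : List (List (List Int))) (i : Int) (s : String) (g : List (List Int))
    (h : PySem.Int.mod i 5 = 2) :
    pvStepA (acc ++ [g]) (i, s) = acc ++ [g ++ [[pvInt s]]] := by
  unfold pvStepA
  rw [if_neg (by rw [h]; decide), if_neg (by rw [h]; decide), if_pos h, pvModLast_append_singleton]

lemma pvStep34 (acc : List (List (List Int))) (i : Int) (s : String) (g : List (List Int))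
    (h : PySem.Int.mod i 5 = 3 ∨ PySem.Int.mod i 5 = 4) :
    pvStepA (acc ++ [g]) (i, s) = acc ++ [pvModLast (fun l => l ++ [pvInt s]) g] := by
  unfold pvStepA
  rw [if_neg (by rcases h with h | h <;> rw [h] <;> decide), if_neg (by rcases h with h | h <;> rw [h] <;> decide),
      if_neg (by rcases h with h | h <;> rw [h] <;> decide), pvModLast_append_singleton]

-- the main invariant: processing tokens from an index that is a multiple of 5
-- appends exactly the chunk decomposition of those tokens
lemma pvMain (ts : List String) (k : Nat) (acc : List (List (List Int))) :
    List.foldl pvStepA acc (pvEnumFrom (5 * (k : Int)) ts) = acc ++ pvChunksB ts := by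
  have h0 : PySem.Int.mod (5 * (k : Int)) 5 = 0 := by
    have h := pvMod5 k 0 (le_refl 0) (by decide)
    rw [add_zero] at h
    exact h
  have h1 : PySem.Int.mod (5 * (k : Int) + 1) 5 = 1 := pvMod5 k 1 (by norm_num) (by norm_num)
  have h2 : PySem.Int.mod (5 * (k : Int) + 1 + 1) 5 = 2 := by
    rw [show (5 * (k : Int) + 1 + 1) = 5 * (k : Int) + 2 by ring]
    exact pvMod5 k 2 (by norm_num) (by norm_num)
  have h3 : PySem.Int.mod (5 * (k : Int) + 1 + 1 + 1) 5 = 3 := by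
    rw [show (5 * (k : Int) + 1 + 1 + 1) = 5 * (k : Int) + 3 by ring]
    exact pvMod5 k 3 (by norm_num) (by norm_num)
  have h4 : PySem.Int.mod (5 * (k : Int) + 1 + 1 + 1 + 1) 5 = 4 := by
    rw [show (5 * (k : Int) + 1 + 1 + 1 + 1) = 5 * (k : Int) + 4 by ring]
    exact pvMod5 k 4 (by norm_num) (by norm_num)
  match ts with
  | [] => simp [pvEnumFrom, pvChunksB.eq_def]
  | [t0] =>
    simp only [pvEnumFrom, List.foldl]
    rw [pvStep0 acc _ _ h0, pvChunksB.eq_def]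
    simp [pvChunksB.eq_def]
  | [t0, t1] =>
    simp only [pvEnumFrom, List.foldl]
    rw [pvStep0 acc _ _ h0, pvStep1 acc _ _ _ h1, pvChunksB.eq_def]
    simp [pvModHead, pvChunksB.eq_def]
  | [t0, t1, t2] =>
    simp only [pvEnumFrom, List.foldl]
    rw [pvStep0 acc _ _ h0, pvStep1 acc _ _ _ h1, pvStep2 acc _ _ _ h2, pvChunksB.eq_def]
    simp [pvModHead, pvChunksB.eq_def]
  | [t0, t1, t2, t3] =>
    simp only [pvEnumFrom, List.foldl]
    rw [pvStep0 acc _ _ h0, pvStep1 acc _ _ _ h1, pvStep2 acc _ _ _ h2,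
        pvStep34 acc _ _ _ (Or.inl h3), pvChunksB.eq_def]
    simp [pvModHead, pvModLast, pvChunksB.eq_def]
  | t0 :: t1 :: t2 :: t3 :: t4 :: rest =>
    simp only [pvEnumFrom, List.foldl]
    rw [pvStep0 acc _ _ h0, pvStep1 acc _ _ _ h1, pvStep2 acc _ _ _ h2,
        pvStep34 acc _ _ _ (Or.inl h3), pvStep34 acc _ _ _ (Or.inr h4)]
    rw [show (5 * (k : Int) + 1 + 1 + 1 + 1 + 1) = 5 * ((k + 1 : Nat) : Int) by push_cast; ring]
    rw [pvMain rest (k + 1) _]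
    conv_rhs => rw [pvChunksB.eq_def]
    simp [pvModHead, pvModLast]
  termination_by ts.length

-- ===== VERDICT (by name: the statement is the Claim_ definition above) =====
theorem skey_string_to_list_spec : Claim_equal_skey_string_to_list := by
  intro skey _ _
  unfold Spec_skey_string_to_list skey_string_to_list skey_string_to_list_alt
  simpa using pvMain (((PySem.Str.split? skey " ").getD []).drop 1) 0 []
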